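-- pv_equiv track=rewrite | github.com/antenore/voynich-toolkit | src/voynich_toolkit/champollion.py | parse_phonemes
-- ===== SOURCE A (Python) =====
-- ITALIAN_TO_HEBREW = {
--     'a':  ['A'],
--     'b':  ['b'],
--     'v':  ['b'],            # bet spirantizzato
--     'g':  ['g'],
--     'd':  ['d'],
--     'e':  ['E', 'h'],       # ayin o he
--     'o':  ['w'],
--     'u':  ['w'],            # vav = o/u
--     'z':  ['z'],
--     'k':  ['X', 'k', 'q'],  # chet, kaf, qof
--     't':  ['J', 't'],       # tet o tav
--     'i':  ['y'],
--     'l':  ['l'],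
--     'm':  ['m'],
--     'n':  ['n'],
--     's':  ['S', 's'],       # shin o samekh
--     'p':  ['p'],
--     'f':  ['p'],            # pe spirantizzato
--     'ts': ['C'],            # tsade
--     'r':  ['r'],
--     'sh': ['S'],            # shin
--     'ch': ['X'],            # chet
-- }
--
-- def parse_phonemes(phonemic):
--     """Spezza stringa fonemica in lista di fonemi singoli.
--
--     'ts', 'sh', 'ch' -> singolo fonema (= 1 lettera ebraica).
--     Tutto il resto -> 1 char = 1 fonema.
--     """
--     phonemes = []
--     i = 0
--     while i < len(phonemic):
--         if (i + 1 < len(phonemic)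
--                 and phonemic[i:i+2] in ITALIAN_TO_HEBREW):
--             phonemes.append(phonemic[i:i+2])
--             i += 2
--         elif phonemic[i] in ITALIAN_TO_HEBREW:
--             phonemes.append(phonemic[i])
--             i += 1
--         else:
--             # Fonema sconosciuto (es. 'w' in parole straniere): skip
--             i += 1
--     return phonemes
-- ===== SOURCE B (Python) =====
-- import re
--
-- ITALIAN_TO_HEBREW = {
--     'a':  ['A'],
--     'b':  ['b'],
--     'v':  ['b'],
--     'g':  ['g'],
--     'd':  ['d'],
--     'e':  ['E', 'h'],
--     'o':  ['w'],
--     'u':  ['w'],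
--     'z':  ['z'],
--     'k':  ['X', 'k', 'q'],
--     't':  ['J', 't'],
--     'i':  ['y'],
--     'l':  ['l'],
--     'm':  ['m'],
--     'n':  ['n'],
--     's':  ['S', 's'],
--     'p':  ['p'],
--     'f':  ['p'],
--     'ts': ['C'],
--     'r':  ['r'],
--     'sh': ['S'],
--     'ch': ['X'],
-- }
--
-- def parse_phonemes(phonemic):
--     """Tokenize with a regex (digraphs preferred by ordered alternation),
--     then drop unknown single characters."""
--     tokens = re.findall(r'ts|sh|ch|.', phonemic, re.DOTALL)
--     return [t for t in tokens if t in ITALIAN_TO_HEBREW]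
-- ===== Notes on version B (the rewrite author's own statement) =====
-- stated objective: idiomatic
-- what changed: Replaced the manual index-walking while-loop with a regex tokenizer (re.findall(r'ts|sh|ch|.', ..., re.DOTALL), ordered alternation preferring the digraphs) followed by a single membership filter that drops unknown characters.
import Mathlib
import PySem

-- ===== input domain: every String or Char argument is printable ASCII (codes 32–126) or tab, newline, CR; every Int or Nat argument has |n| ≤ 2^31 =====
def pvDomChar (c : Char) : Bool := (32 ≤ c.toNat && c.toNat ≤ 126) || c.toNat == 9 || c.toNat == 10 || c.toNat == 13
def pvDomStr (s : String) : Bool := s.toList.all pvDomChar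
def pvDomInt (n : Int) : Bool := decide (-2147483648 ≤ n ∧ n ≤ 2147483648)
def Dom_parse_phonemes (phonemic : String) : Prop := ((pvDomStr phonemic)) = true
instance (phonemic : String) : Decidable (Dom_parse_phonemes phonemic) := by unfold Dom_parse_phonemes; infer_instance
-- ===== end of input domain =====

-- B replaces A's manual index-walking loop by a regex tokenizer (ordered alternation
-- 'ts|sh|ch|.') followed by one membership filter: idiomatic, same O(n) cost.

-- ===== PORT A =====
def ITALIAN_TO_HEBREW : PySem.Dict String (List String) :=
  PySem.Dict.ofList
    [("a", ["A"]), ("b", ["b"]), ("v", ["b"]), ("g", ["g"]), ("d", ["d"]),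
     ("e", ["E", "h"]), ("o", ["w"]), ("u", ["w"]), ("z", ["z"]),
     ("k", ["X", "k", "q"]), ("t", ["J", "t"]), ("i", ["y"]), ("l", ["l"]),
     ("m", ["m"]), ("n", ["n"]), ("s", ["S", "s"]), ("p", ["p"]), ("f", ["p"]),
     ("ts", ["C"]), ("r", ["r"]), ("sh", ["S"]), ("ch", ["X"])]

-- A's while-loop over the index i; one iteration consumes one or two characters,
-- transcribed as structural recursion on the remaining character list.
def parsePhonemesGo : List Char → List String
  | c1 :: c2 :: rest =>
    if ITALIAN_TO_HEBREW.contains (String.ofList [c1, c2]) then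
      String.ofList [c1, c2] :: parsePhonemesGo rest
    else if ITALIAN_TO_HEBREW.contains (String.ofList [c1]) then
      String.ofList [c1] :: parsePhonemesGo (c2 :: rest)
    else
      parsePhonemesGo (c2 :: rest)
  | [c1] =>  -- i + 1 < len(phonemic) fails: only the single-char branches remain
    if ITALIAN_TO_HEBREW.contains (String.ofList [c1]) then [String.ofList [c1]] else []
  | [] => []

def parse_phonemes (phonemic : String) : List String :=
  parsePhonemesGo phonemic.toList

-- ===== PORT B =====
-- re.findall(r'ts|sh|ch|.', phonemic, re.DOTALL): PySem has no regex, so the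
-- tokenizer is ported by hand, exactly as the pattern matches — at each position
-- the ordered alternation prefers one of the three digraphs, otherwise '.'
-- (with DOTALL) consumes exactly one character. Exact on every input.
def pyTokenize : List Char → List String
  | c1 :: c2 :: rest =>
    if [c1, c2] = ['t', 's'] ∨ [c1, c2] = ['s', 'h'] ∨ [c1, c2] = ['c', 'h'] then
      String.ofList [c1, c2] :: pyTokenize rest
    else
      String.ofList [c1] :: pyTokenize (c2 :: rest)
  | [c1] => [String.ofList [c1]]
  | [] => []

def parse_phonemes_alt (phonemic : String) : List String :=
  (pyTokenize phonemic.toList).filter (fun t => ITALIAN_TO_HEBREW.contains t)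

-- ===== PRECONDITION & SPEC =====
def Spec_parse_phonemes (phonemic : String) (out : List String) : Prop := out = parse_phonemes_alt phonemic
instance (phonemic : String) (out : List String) : Decidable (Spec_parse_phonemes phonemic out) := by unfold Spec_parse_phonemes; infer_instance

-- ===== CLAIM (what is proved, stated in full; the proofs are below) =====
def Claim_equal_parse_phonemes : Prop := ∀ (phonemic : String), Dom_parse_phonemes phonemic → Spec_parse_phonemes phonemic (parse_phonemes phonemic)

-- ===== LEMMAS AND PROOFS =====

theorem str_beq_ofList (s : String) (l : List Char) : (s == String.ofList l) = (s.toList == l) := by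
  rw [Bool.eq_iff_iff, beq_iff_eq, beq_iff_eq]
  constructor
  · intro h; rw [h, String.toList_ofList]
  · intro h; rw [← h, String.ofList_toList]

-- the dict literal, with its items written out (ofList deduplicates nothing here)
theorem italianToHebrew_eq_mk : ITALIAN_TO_HEBREW = PySem.Dict.mk
    [("a", ["A"]), ("b", ["b"]), ("v", ["b"]), ("g", ["g"]), ("d", ["d"]),
     ("e", ["E", "h"]), ("o", ["w"]), ("u", ["w"]), ("z", ["z"]),
     ("k", ["X", "k", "q"]), ("t", ["J", "t"]), ("i", ["y"]), ("l", ["l"]),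
     ("m", ["m"]), ("n", ["n"]), ("s", ["S", "s"]), ("p", ["p"]), ("f", ["p"]),
     ("ts", ["C"]), ("r", ["r"]), ("sh", ["S"]), ("ch", ["X"])] := by decide

-- a two-character string is a key of the dict exactly when it is one of the digraphs
set_option maxRecDepth 8192 in
theorem contains_two (c1 c2 : Char) :
    ITALIAN_TO_HEBREW.contains (String.ofList [c1, c2]) = true ↔
      ([c1, c2] = ['t', 's'] ∨ [c1, c2] = ['s', 'h'] ∨ [c1, c2] = ['c', 'h']) := by
  rw [italianToHebrew_eq_mk]
  simp [PySem.Dict.contains, str_beq_ofList,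
    show ("a":String).toList = ['a'] from by decide, show ("b":String).toList = ['b'] from by decide,
    show ("v":String).toList = ['v'] from by decide, show ("g":String).toList = ['g'] from by decide,
    show ("d":String).toList = ['d'] from by decide, show ("e":String).toList = ['e'] from by decide,
    show ("o":String).toList = ['o'] from by decide, show ("u":String).toList = ['u'] from by decide,
    show ("z":String).toList = ['z'] from by decide, show ("k":String).toList = ['k'] from by decide,
    show ("t":String).toList = ['t'] from by decide, show ("i":String).toList = ['i'] from by decide,
    show ("l":String).toList = ['l'] from by decide, show ("m":String).toList = ['m'] from by decide,
    show ("n":String).toList = ['n'] from by decide, show ("s":String).toList = ['s'] from by decide,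
    show ("p":String).toList = ['p'] from by decide, show ("f":String).toList = ['f'] from by decide,
    show ("r":String).toList = ['r'] from by decide,
    show ("ts":String).toList = ['t','s'] from by decide,
    show ("sh":String).toList = ['s','h'] from by decide,
    show ("ch":String).toList = ['c','h'] from by decide]
  constructor
  · rintro (⟨rfl, rfl⟩ | ⟨rfl, rfl⟩ | ⟨rfl, rfl⟩) <;> simp
  · rintro (h | h | h) <;> simp_all

theorem parsePhonemesGo_eq_filter (l : List Char) :
    parsePhonemesGo l = (pyTokenize l).filter (fun t => ITALIAN_TO_HEBREW.contains t) := by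
  induction l using pyTokenize.induct with
  | case1 c1 c2 rest h ih =>
    have hb : ITALIAN_TO_HEBREW.contains (String.ofList [c1, c2]) = true := by
      exact (contains_two c1 c2).mpr h
    rw [parsePhonemesGo, pyTokenize, if_pos hb, if_pos h, List.filter_cons, if_pos hb, ih]
  | case2 c1 c2 rest h ih =>
    have hb : ¬ ITALIAN_TO_HEBREW.contains (String.ofList [c1, c2]) = true := by
      exact fun hc => h ((contains_two c1 c2).mp hc)
    rw [parsePhonemesGo, pyTokenize, if_neg hb, if_neg h, List.filter_cons, ih]
  | case3 c1 =>
    rw [parsePhonemesGo, pyTokenize, List.filter_cons, List.filter_nil]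
  | case4 => rfl

-- ===== VERDICT (by name: the statement is the Claim_ definition above) =====
theorem parse_phonemes_spec : Claim_equal_parse_phonemes := by
  intro phonemic _
  unfold Spec_parse_phonemes parse_phonemes parse_phonemes_alt
  exact parsePhonemesGo_eq_filter _
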